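-- pv_equiv track=rewrite | github.com/marcosgeo/codewars | deadants.py | dead_ant_count
-- ===== SOURCE A (Python) =====
-- def dead_ant_count(ants):
--     # Your code here
--     ants = ants.split()
--     heads = 0
--     tails = 0
--     bodies = 0
--     for ant in ants:
--         if ant != "ant":
--             if "ant" in ant:
--                 ant = ant.replace("ant", "")
--             heads += ant.count("a")
--             tails += ant.count("t")
--             bodies += ant.count("n")
--
--     return max([heads, tails, bodies])
-- ===== SOURCE B (Python) =====
-- def dead_ant_count(ants):
--     k = ants.count("ant")
--     return max(ants.count("a"), ants.count("t"), ants.count("n")) - k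
-- ===== Notes on version B (the rewrite author's own statement) =====
-- stated objective: simpler
-- what changed: B drops the split/replace per-token loop entirely: it counts the non-overlapping 'ant' occurrences and the 'a'/'t'/'n' characters once over the whole string and returns max of the three letter totals minus the 'ant' count, which is exact because whitespace blocks cross-token 'ant' matches and each removed 'ant' takes exactly one a, one t and one n.
import Mathlib
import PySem

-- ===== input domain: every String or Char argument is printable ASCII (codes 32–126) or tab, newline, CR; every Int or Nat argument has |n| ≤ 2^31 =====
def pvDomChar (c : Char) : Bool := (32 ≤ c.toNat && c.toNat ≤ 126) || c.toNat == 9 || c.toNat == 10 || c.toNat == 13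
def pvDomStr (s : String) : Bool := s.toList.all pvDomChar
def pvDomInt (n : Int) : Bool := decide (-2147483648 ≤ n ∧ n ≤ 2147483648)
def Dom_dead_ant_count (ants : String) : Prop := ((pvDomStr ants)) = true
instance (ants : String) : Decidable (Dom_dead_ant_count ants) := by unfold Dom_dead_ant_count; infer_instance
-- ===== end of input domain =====

-- B replaces A's split/replace per-token loop by whole-string counts: max of the global
-- 'a'/'t'/'n' character counts minus the global non-overlapping "ant" count (objective: simpler).


-- ===== PORT A =====
-- the body of A's 'for ant in ants' loop, on the (heads, tails, bodies) state
def pvStepA (st : Int × Int × Int) (ant : List Char) : Int × Int × Int :=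
  if ant ≠ ['a', 'n', 't'] then
    let ant := if PySem.Chars.isIn ['a', 'n', 't'] ant
               then PySem.Chars.replace ant ['a', 'n', 't'] [] else ant
    (st.1 + (PySem.Chars.count ant ['a'] : Int),
     st.2.1 + (PySem.Chars.count ant ['t'] : Int),
     st.2.2 + (PySem.Chars.count ant ['n'] : Int))
  else st

def dead_ant_count (ants : String) : Int :=
  let toks := PySem.Chars.split₀ ants.toList   -- ants = ants.split()
  let st := toks.foldl pvStepA (0, 0, 0)
  -- max([heads, tails, bodies]); the literal 3-element list is never empty, so Python's max returns
  (PySem.List.max? [st.1, st.2.1, st.2.2] (fun v => v)).getD 0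

-- ===== PORT B =====
def dead_ant_count_alt (ants : String) : Int :=
  let k : Int := PySem.Str.count ants "ant"
  max (PySem.Str.count ants "a" : Int)
    (max (PySem.Str.count ants "t" : Int) (PySem.Str.count ants "n" : Int)) - k

-- ===== PRECONDITION & SPEC =====
def Spec_dead_ant_count (ants : String) (out : Int) : Prop := out = dead_ant_count_alt ants
instance (ants : String) (out : Int) : Decidable (Spec_dead_ant_count ants out) := by unfold Spec_dead_ant_count; infer_instance

-- ===== CLAIM (what is proved, stated in full; the proofs are below) =====
def Claim_equal_dead_ant_count : Prop := ∀ (ants : String), Dom_dead_ant_count ants → Spec_dead_ant_count ants (dead_ant_count ants)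

-- ===== LEMMAS AND PROOFS =====

-- number of non-overlapping occurrences of "ant" (Python str.count semantics)
def pvOcc : List Char → Nat
  | [] => 0
  | c :: t => if ['a', 'n', 't'].isPrefixOf (c :: t) then pvOcc (t.drop 2) + 1 else pvOcc t
termination_by l => l.length
decreasing_by all_goals simp [List.length_drop]

-- the result of t.replace("ant", "")
def pvRepl : List Char → List Char
  | [] => []
  | c :: t => if ['a', 'n', 't'].isPrefixOf (c :: t) then pvRepl (t.drop 2) else c :: pvRepl t
termination_by l => l.length
decreasing_by all_goals simp [List.length_drop]

-- str.split() spec: the words of cur ++ l, cur being the unfinished current word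
def pvW : List Char → List Char → List (List Char)
  | [], cur => if cur = [] then [] else [cur]
  | c :: rest, cur =>
      if PySem.Chars.isspace c then
        (if cur = [] then pvW rest [] else cur :: pvW rest [])
      else pvW rest (cur ++ [c])

lemma pv_prefix_ant {l : List Char} (h : (['a','n','t'] : List Char).isPrefixOf l = true) :
    ∃ t, l = 'a' :: 'n' :: 't' :: t := by
  rcases l with _ | ⟨c, _ | ⟨d, _ | ⟨e, t⟩⟩⟩ <;> simp [List.isPrefixOf] at h
  · obtain ⟨h1, h2, h3⟩ := h
    exact ⟨t, by rw [← h1, ← h2, ← h3]⟩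

lemma pv_count_go_ant : ∀ (fuel : Nat) (l : List Char) (acc : Nat), l.length ≤ fuel →
    PySem.Chars.count.go ['a','n','t'] fuel l acc = acc + pvOcc l := by
  intro fuel
  induction fuel with
  | zero => intro l acc h
            have : l = [] := by cases l <;> simp_all
            subst this; simp [PySem.Chars.count.go, pvOcc]
  | succ n ih =>
    intro l acc h
    cases l with
    | nil => simp [PySem.Chars.count.go, pvOcc]
    | cons c t =>
      rw [PySem.Chars.count.go]
      by_cases hp : (['a','n','t'] : List Char).isPrefixOf (c :: t) = true
      · simp only [hp, if_true]
        rw [ih _ _ (by simp at h ⊢; omega)]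
        rw [pvOcc]
        simp [hp]; omega
      · simp only [hp, if_false, Bool.false_eq_true]
        rw [pvOcc]; simp only [hp, if_false, Bool.false_eq_true]
        exact ih _ _ (by simp at h ⊢; omega)

lemma pv_count_ant (l : List Char) : PySem.Chars.count l ['a','n','t'] = pvOcc l := by
  rw [PySem.Chars.count]
  simp only [List.isEmpty_cons, if_false, Bool.false_eq_true]
  rw [pv_count_go_ant l.length l 0 le_rfl]; omega

lemma pv_count_go_single (c : Char) : ∀ (fuel : Nat) (l : List Char) (acc : Nat), l.length ≤ fuel →
    PySem.Chars.count.go [c] fuel l acc = acc + l.count c := by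
  intro fuel
  induction fuel with
  | zero => intro l acc h
            have : l = [] := by cases l <;> simp_all
            subst this; simp [PySem.Chars.count.go]
  | succ n ih =>
    intro l acc h
    cases l with
    | nil => simp [PySem.Chars.count.go]
    | cons d t =>
      rw [PySem.Chars.count.go]
      by_cases hp : ([c] : List Char).isPrefixOf (d :: t) = true
      · have hcd : c = d := by simpa [List.isPrefixOf] using hp
        simp only [hp, if_true]
        rw [ih _ _ (by simp at h ⊢; omega)]
        subst hcd
        simp [List.count_cons]
        omega
      · have hcd : ¬ d = c := by
          intro hh; exact hp (by simp [List.isPrefixOf, hh])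
        simp only [hp, if_false, Bool.false_eq_true]
        rw [ih _ _ (by simp at h ⊢; omega)]
        simp [hcd]

lemma pv_count_single (l : List Char) (c : Char) : PySem.Chars.count l [c] = l.count c := by
  rw [PySem.Chars.count]
  simp only [List.isEmpty_cons, if_false, Bool.false_eq_true]
  rw [pv_count_go_single c l.length l 0 le_rfl]; omega

lemma pv_replace_go : ∀ (fuel : Nat) (l acc : List Char), l.length ≤ fuel →
    PySem.Chars.replace.go ['a','n','t'] [] fuel l acc = acc.reverse ++ pvRepl l := by
  intro fuel
  induction fuel with
  | zero => intro l acc h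
            have : l = [] := by cases l <;> simp_all
            subst this; simp [PySem.Chars.replace.go, pvRepl]
  | succ n ih =>
    intro l acc h
    cases l with
    | nil => simp [PySem.Chars.replace.go, pvRepl]
    | cons c t =>
      rw [PySem.Chars.replace.go]
      by_cases hp : (['a','n','t'] : List Char).isPrefixOf (c :: t) = true
      · simp only [hp, if_true]
        rw [ih _ _ (by simp at h ⊢; omega)]
        rw [pvRepl]
        simp [hp]
      · simp only [hp, if_false, Bool.false_eq_true]
        rw [ih _ _ (by simp at h ⊢; omega), pvRepl]
        simp [hp]

lemma pv_replace_ant (l : List Char) : PySem.Chars.replace l ['a','n','t'] [] = pvRepl l := by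
  rw [PySem.Chars.replace]
  simp only [List.isEmpty_cons, if_false, Bool.false_eq_true]
  rw [pv_replace_go l.length l [] le_rfl]
  simp

-- each removed "ant" occurrence removes exactly one copy of each of its letters
lemma pv_count_repl (c : Char) (hc : (['a','n','t'] : List Char).count c = 1) :
    ∀ l : List Char, (pvRepl l).count c + pvOcc l = l.count c := by
  intro l
  induction l using pvRepl.induct with
  | case1 => simp [pvRepl, pvOcc]
  | case2 d t hp ih =>
    obtain ⟨t', ht⟩ := pv_prefix_ant hp
    obtain ⟨rfl, ht2⟩ := List.cons.inj ht
    subst ht2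
    rw [pvRepl, pvOcc]; simp only [hp, if_true]
    simp only [List.drop] at ih ⊢
    have hcnt : List.count c ('a' :: 'n' :: 't' :: t') = 1 + List.count c t' := by
      have := List.count_append (l₁ := ['a','n','t']) (l₂ := t') (a := c)
      simp at this hc
      omega
    omega
  | case3 d t hp ih =>
    rw [pvRepl, pvOcc]; simp only [hp, if_false, Bool.false_eq_true]
    simp [List.count_cons] at ih ⊢
    omega

lemma pv_occ_infix : ∀ l : List Char, pvOcc l ≠ 0 → (['a','n','t'] : List Char) <:+: l := by
  intro l
  induction l using pvOcc.induct with
  | case1 => simp [pvOcc]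
  | case2 d t hp ih =>
    intro _
    obtain ⟨t', ht⟩ := pv_prefix_ant hp
    exact ⟨[], t', ht.symm⟩
  | case3 d t hp ih =>
    intro h
    rw [pvOcc] at h; simp only [hp, if_false, Bool.false_eq_true] at h
    exact (ih h).trans (List.suffix_cons d t).isInfix

lemma pv_isspace_ant : PySem.Chars.isspace 'a' = false ∧ PySem.Chars.isspace 'n' = false ∧
    PySem.Chars.isspace 't' = false := by decide

-- a whitespace character blocks "ant" occurrences from crossing it
lemma pv_occ_append_space {c : Char} (hc : PySem.Chars.isspace c = true) :
    ∀ x y : List Char, pvOcc (x ++ c :: y) = pvOcc x + pvOcc y := by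
  intro x
  induction x using pvOcc.induct with
  | case1 =>
    intro y
    rw [List.nil_append, pvOcc]
    by_cases hp : (['a','n','t'] : List Char).isPrefixOf (c :: y) = true
    · obtain ⟨t', ht⟩ := pv_prefix_ant hp
      obtain ⟨rfl, -⟩ := List.cons.inj ht
      rw [pv_isspace_ant.1] at hc; cases hc
    · simp [hp, pvOcc]
  | case2 d t hp ih =>
    intro y
    obtain ⟨t', ht⟩ := pv_prefix_ant hp
    obtain ⟨rfl, ht2⟩ := List.cons.inj ht
    subst ht2
    have hp2 : (['a','n','t'] : List Char).isPrefixOf ('a' :: 'n' :: 't' :: (t' ++ c :: y)) = true := by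
      simp [List.isPrefixOf]
    rw [List.cons_append, pvOcc]
    simp only [hp2, if_true, List.cons_append, List.drop]
    rw [pvOcc]
    simp only [hp, if_true, List.drop] at ih ⊢
    rw [ih y]
    omega
  | case3 d t hp ih =>
    intro y
    have hp2 : (['a','n','t'] : List Char).isPrefixOf (d :: (t ++ c :: y)) = false := by
      by_contra hcon
      rw [Bool.not_eq_false] at hcon
      obtain ⟨t3, ht⟩ := pv_prefix_ant hcon
      rcases t with _ | ⟨e, _ | ⟨f, t''⟩⟩
      · obtain ⟨rfl, ht2⟩ := List.cons.inj ht
        obtain ⟨rfl, -⟩ := List.cons.inj ht2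
        rw [pv_isspace_ant.2.1] at hc; cases hc
      · obtain ⟨rfl, ht2⟩ := List.cons.inj ht
        obtain ⟨rfl, ht3⟩ := List.cons.inj ht2
        obtain ⟨rfl, -⟩ := List.cons.inj ht3
        rw [pv_isspace_ant.2.2] at hc; cases hc
      · obtain ⟨rfl, ht2⟩ := List.cons.inj ht
        obtain ⟨rfl, ht3⟩ := List.cons.inj ht2
        obtain ⟨rfl, -⟩ := List.cons.inj ht3
        simp [List.isPrefixOf] at hp
    rw [List.cons_append, pvOcc]
    simp only [hp2, if_false, Bool.false_eq_true]
    rw [pvOcc]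
    simp only [hp, if_false, Bool.false_eq_true]
    exact ih y

-- a non-whitespace character's occurrences are exactly distributed over the words
lemma pv_countc_w {c : Char} (hc : PySem.Chars.isspace c = false) :
    ∀ (l cur : List Char), ((pvW l cur).map (fun t => t.count c)).sum = cur.count c + l.count c := by
  intro l
  induction l with
  | nil =>
    intro cur
    by_cases h : cur = [] <;> simp [pvW, h]
  | cons d rest ih =>
    intro cur
    rw [pvW]
    by_cases hd : PySem.Chars.isspace d = true
    · have hdc : ¬ d = c := fun hh => by rw [hh, hc] at hd; cases hd
      by_cases h : cur = []
      · simp only [hd, if_true, h, if_true]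
        rw [ih []]
        simp [List.count_cons, hdc, h]
      · simp only [hd, if_true, h, if_false]
        simp only [List.map_cons, List.sum_cons]
        rw [ih []]
        simp [List.count_cons, hdc]
    · rw [Bool.not_eq_true] at hd
      simp only [hd, if_false, Bool.false_eq_true]
      rw [ih (cur ++ [d])]
      simp [List.count_cons, List.count_append]
      omega

-- so are the "ant" occurrences, because whitespace blocks them (pv_occ_append_space)
lemma pv_occ_w : ∀ (l cur : List Char), (∀ x ∈ cur, PySem.Chars.isspace x = false) →
    ((pvW l cur).map pvOcc).sum = pvOcc (cur ++ l) := by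
  intro l
  induction l with
  | nil =>
    intro cur hcur
    by_cases h : cur = [] <;> simp [pvW, h, pvOcc]
  | cons d rest ih =>
    intro cur hcur
    rw [pvW]
    by_cases hd : PySem.Chars.isspace d = true
    · rw [pv_occ_append_space hd cur rest]
      by_cases h : cur = []
      · simp only [hd, if_true, h, if_true]
        rw [ih [] (by simp)]
        simp [h, pvOcc]
      · simp only [hd, if_true, h, if_false]
        simp only [List.map_cons, List.sum_cons]
        rw [ih [] (by simp)]
        simp [pvOcc]
    · rw [Bool.not_eq_true] at hd
      simp only [hd, if_false, Bool.false_eq_true]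
      rw [ih (cur ++ [d]) (by intro x hx; rcases List.mem_append.mp hx with h | h
                              · exact hcur x h
                              · simp at h; subst h; exact hd)]
      simp

lemma pv_split₀_go : ∀ (l cur : List Char) (accw : List (List Char)),
    PySem.Chars.split₀.go l cur accw = accw.reverse ++ pvW l cur.reverse := by
  intro l
  induction l with
  | nil =>
    intro cur accw
    rw [PySem.Chars.split₀.go, pvW]
    by_cases h : cur = []
    · simp [h]
    · have : ¬ cur.reverse = [] := by simpa using h
      simp [h, this]
  | cons d rest ih =>
    intro cur accw
    rw [PySem.Chars.split₀.go, pvW]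
    by_cases hd : PySem.Chars.isspace d = true
    · by_cases h : cur = []
      · simp only [hd, if_true, h]
        rw [ih [] accw]
        simp [h]
      · have h2 : ¬ cur.reverse = [] := by simpa using h
        have h3 : cur.isEmpty = false := by simpa [List.isEmpty_iff] using h
        simp only [hd, if_true, h3, if_false, h2, Bool.false_eq_true]
        rw [ih [] (cur.reverse :: accw)]
        simp
    · rw [Bool.not_eq_true] at hd
      simp only [hd, if_false, Bool.false_eq_true]
      rw [ih (d :: cur) accw]
      simp

lemma pv_split₀ (l : List Char) : PySem.Chars.split₀ l = pvW l [] := by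
  rw [PySem.Chars.split₀, pv_split₀_go]
  simp

-- every token contributes its letter count minus its "ant" count, in all three branches of A's loop
lemma pv_step (st : Int × Int × Int) (tok : List Char) :
    pvStepA st tok = (st.1 + ((tok.count 'a' : Int) - pvOcc tok),
                      st.2.1 + ((tok.count 't' : Int) - pvOcc tok),
                      st.2.2 + ((tok.count 'n' : Int) - pvOcc tok)) := by
  rw [pvStepA]
  by_cases he : tok = ['a', 'n', 't']
  · subst he
    simp [pvOcc, List.isPrefixOf]
  · simp only [he, ne_eq, not_false_iff, if_true]
    by_cases hin : PySem.Chars.isIn ['a', 'n', 't'] tok = true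
    · simp only [hin, if_true]
      rw [pv_replace_ant]
      rw [pv_count_single, pv_count_single, pv_count_single]
      have ha := pv_count_repl 'a' (by decide) tok
      have ht := pv_count_repl 't' (by decide) tok
      have hn := pv_count_repl 'n' (by decide) tok
      refine Prod.ext ?_ (Prod.ext ?_ ?_) <;> simp <;> omega
    · simp only [hin, if_false, Bool.false_eq_true]
      have hocc : pvOcc tok = 0 := by
        by_contra h
        exact (PySem.Chars.isIn_eq_false_iff _ _ |>.mp (by simpa using hin)) (pv_occ_infix tok h)
      rw [pv_count_single, pv_count_single, pv_count_single, hocc]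
      simp

lemma pv_fold : ∀ (toks : List (List Char)) (h t b : Int),
    toks.foldl pvStepA (h, t, b) =
      (h + ((((toks.map (fun tk => tk.count 'a')).sum : ℕ)) : Int) - ((toks.map pvOcc).sum : Int),
       t + ((((toks.map (fun tk => tk.count 't')).sum : ℕ)) : Int) - ((toks.map pvOcc).sum : Int),
       b + ((((toks.map (fun tk => tk.count 'n')).sum : ℕ)) : Int) - ((toks.map pvOcc).sum : Int)) := by
  intro toks
  induction toks with
  | nil => intro h t b; simp
  | cons tok rest ih =>
    intro h t b
    rw [List.foldl_cons, pv_step]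
    rw [ih]
    simp only [List.map_cons, List.sum_cons]
    refine Prod.ext ?_ (Prod.ext ?_ ?_) <;> simp <;> push_cast <;> ring

lemma pv_max3 (x y z : Int) : (PySem.List.max? [x, y, z] (fun v => v)).getD 0 = max x (max y z) := by
  simp only [PySem.List.max?, List.foldl]
  by_cases h1 : x < y <;> by_cases h2 : x < z <;> by_cases h3 : y < z <;>
    simp [h1, h2, h3] <;> omega

theorem pv_main (ants : String) : dead_ant_count ants = dead_ant_count_alt ants := by
  simp only [dead_ant_count, dead_ant_count_alt]
  rw [pv_split₀, pv_fold, pv_max3]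
  rw [pv_countc_w pv_isspace_ant.1, pv_countc_w pv_isspace_ant.2.2, pv_countc_w pv_isspace_ant.2.1,
      pv_occ_w _ [] (by simp)]
  have ha : ("a" : String).toList = ['a'] := rfl
  have ht : ("t" : String).toList = ['t'] := rfl
  have hn : ("n" : String).toList = ['n'] := rfl
  have hant : ("ant" : String).toList = ['a', 'n', 't'] := rfl
  rw [PySem.Str.count_eq, PySem.Str.count_eq, PySem.Str.count_eq, PySem.Str.count_eq,
      ha, ht, hn, hant, pv_count_ant, pv_count_single, pv_count_single, pv_count_single]
  simp only [List.nil_append, List.count_nil, zero_add]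
  rw [max_sub_sub_right, max_sub_sub_right]

-- ===== VERDICT (by name: the statement is the Claim_ definition above) =====
theorem dead_ant_count_spec : Claim_equal_dead_ant_count := by
  intro ants _
  unfold Spec_dead_ant_count
  exact pv_main ants
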